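-- pv_equiv track=rewrite | github.com/hansrajdas/random | max_test_complete.py | max_test_complete
-- ===== SOURCE A (Python) =====
-- def max_test_complete(A):
--     _m = -1
--     max_idx = -1
--     for i in range(len(A)):
--         if _m < A[i] and A[i] < len(A):
--             max_idx = i
--             _m = A[i]
--     return ((max_idx + 1) % len(A)) + 1
-- ===== SOURCE B (Python) =====
-- def max_test_complete(A):
--     n = len(A)
--     first = {}
--     for i, v in enumerate(A):
--         if -1 < v < n and v not in first:
--             first[v] = i
--     max_idx = -1
--     for v in range(n - 1, -1, -1):
--         if v in first:
--             max_idx = first[v]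
--             break
--     return ((max_idx + 1) % n) + 1
-- ===== Notes on version B (the rewrite author's own statement) =====
-- stated objective: alternative
-- what changed: Replaces A's fused running-max scan over positions by a bucket/hash index: one pass builds a value-to-first-index dict for in-range values, then a descending scan over the value range 0..n-1 finds the largest value present and returns its stored first index.
import Mathlib
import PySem

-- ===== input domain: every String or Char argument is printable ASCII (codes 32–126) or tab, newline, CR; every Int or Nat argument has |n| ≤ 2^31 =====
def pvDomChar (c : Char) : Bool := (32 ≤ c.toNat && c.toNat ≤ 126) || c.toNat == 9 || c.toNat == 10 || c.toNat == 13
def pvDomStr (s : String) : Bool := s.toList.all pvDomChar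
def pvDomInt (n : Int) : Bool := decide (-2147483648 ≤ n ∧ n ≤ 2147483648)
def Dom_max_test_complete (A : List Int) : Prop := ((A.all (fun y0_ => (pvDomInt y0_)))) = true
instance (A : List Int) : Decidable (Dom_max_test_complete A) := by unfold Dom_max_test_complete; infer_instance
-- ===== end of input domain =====

-- B replaces A's fused running-max scan over positions by a value→first-index dict built in one
-- pass plus a descending scan over the value range 0..n-1 (objective: alternative).

-- ===== PORT A =====
-- state p = (_m, max_idx); the loop 'for i in range(len(A))' with A[i] is ported as a fold over enumerate A
def max_test_complete (A : List Int) : Int :=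
  PySem.Int.mod
    (((PySem.List.enumerate A 0).foldl
        (fun (p : Int × Int) iv =>
          if p.1 < iv.2 ∧ iv.2 < (A.length : Int) then (iv.2, iv.1) else p)
        (-1, -1)).2 + 1)
    (A.length : Int) + 1

-- ===== PORT B =====
-- first pass: 'for i, v in enumerate(A): if -1 < v < n and v not in first: first[v] = i'
def pvBuild (n : Int) (A : List Int) : PySem.Dict Int Int :=
  (PySem.List.enumerate A 0).foldl
    (fun d iv =>
      if (-1 : Int) < iv.2 ∧ iv.2 < n ∧ ¬ d.contains iv.2 = true then d.insert iv.2 iv.1 else d)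
    PySem.Dict.empty

-- second pass: 'for v in range(n-1, -1, -1): if v in first: max_idx = first[v]; break' (default -1)
def pvScan (d : PySem.Dict Int Int) : List Int → Int
  | [] => -1
  | v :: rest =>
    match d.get? v with
    | some i => i
    | none => pvScan d rest

def max_test_complete_alt (A : List Int) : Int :=
  let n : Int := (A.length : Int)
  let first := pvBuild n A
  let maxIdx := pvScan first (PySem.List.pyRange (n - 1) (-1) (-1))
  PySem.Int.mod (maxIdx + 1) n + 1

-- ===== PRECONDITION & SPEC =====
-- Python A raises ZeroDivisionError on the empty list (the final '% len(A)'); only that input is excluded.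
def Pre_max_test_complete (A : List Int) : Prop := A ≠ []
instance (A : List Int) : Decidable (Pre_max_test_complete A) := by unfold Pre_max_test_complete; infer_instance
def pvWitness_max_test_complete : List Int := [2, 0, 2]

def Spec_max_test_complete (A : List Int) (out : Int) : Prop := out = max_test_complete_alt A
instance (A : List Int) (out : Int) : Decidable (Spec_max_test_complete A out) := by unfold Spec_max_test_complete; infer_instance

-- ===== CLAIM (what is proved, stated in full; the proofs are below) =====
def Claim_equal_max_test_complete : Prop := ∀ (A : List Int), Dom_max_test_complete A → Pre_max_test_complete A → Spec_max_test_complete A (max_test_complete A)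

-- ===== LEMMAS AND PROOFS =====

-- the loop step of A, with the length bound N fixed
def pvStep (N : Int) (p : Int × Int) (iv : Int × Int) : Int × Int :=
  if p.1 < iv.2 ∧ iv.2 < N then (iv.2, iv.1) else p

-- invariant of A's fold over any prefix l (N is the fixed length bound)
theorem pvInv (N : Int) (l : List Int) :
    ((∀ v ∈ l, ¬ (0 ≤ v ∧ v < N)) ∧
      (PySem.List.enumerate l 0).foldl (pvStep N) (-1, -1) = (-1, -1)) ∨
    (∃ (m : Int) (k : Nat),
      (PySem.List.enumerate l 0).foldl (pvStep N) (-1, -1) = (m, (k : Int)) ∧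
      0 ≤ m ∧ m < N ∧ m ∈ l ∧ (∀ v ∈ l, 0 ≤ v → v < N → v ≤ m) ∧
      PySem.List.index? l m = some k) := by
  induction l using List.reverseRecOn with
  | nil => left; simp [PySem.List.enumerate]
  | append_singleton p x ih =>
    have henum : PySem.List.enumerate (p ++ [x]) 0
        = PySem.List.enumerate p 0 ++ [((p.length : Int), x)] := by
      rw [PySem.List.enumerate_append]
      simp [PySem.List.enumerate]
    rw [henum, List.foldl_append]
    rcases ih with ⟨hf, hst⟩ | ⟨m, k, hst, hm0, hmN, hmem, hmax, hidx⟩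
    · rw [hst]
      by_cases hx : (-1 : Int) < x ∧ x < N
      · right
        have hx0 : 0 ≤ x := by omega
        have hxnp : x ∉ p := fun hxp => hf x hxp ⟨hx0, hx.2⟩
        refine ⟨x, p.length, by simp [pvStep, hx], hx0, hx.2, by simp, ?_, ?_⟩
        · intro v hv hv0 hvN
          rcases List.mem_append.1 hv with hv | hv
          · exact absurd ⟨hv0, hvN⟩ (hf v hv)
          · simp at hv; omega
        · exact PySem.List.index?_append_singleton_self p x hxnp
      · left
        refine ⟨?_, by simp [pvStep, hx]⟩
        intro v hv
        rcases List.mem_append.1 hv with hv | hv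
        · exact hf v hv
        · simp at hv; omega
    · rw [hst]
      by_cases hx : m < x ∧ x < N
      · right
        have hx0 : 0 ≤ x := by omega
        have hxnp : x ∉ p := by
          intro hxp
          have := hmax x hxp hx0 hx.2
          omega
        refine ⟨x, p.length, by simp [pvStep, hx], hx0, hx.2, by simp, ?_, ?_⟩
        · intro v hv hv0 hvN
          rcases List.mem_append.1 hv with hv | hv
          · have := hmax v hv hv0 hvN; omega
          · simp at hv; omega
        · exact PySem.List.index?_append_singleton_self p x hxnp
      · right
        refine ⟨m, k, by simp [pvStep, hx], hm0, hmN, List.mem_append_left _ hmem, ?_, ?_⟩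
        · intro v hv hv0 hvN
          rcases List.mem_append.1 hv with hv | hv
          · exact hmax v hv hv0 hvN
          · simp at hv; omega
        · rw [PySem.List.index?_append_of_mem _ hmem]
          exact hidx

-- index? is unchanged by appending x when v is already in p or differs from x
theorem pvIndexSame (p : List Int) (x v : Int) (h : v ∈ p ∨ v ≠ x) :
    PySem.List.index? (p ++ [x]) v = PySem.List.index? p v := by
  by_cases hvp : v ∈ p
  · exact PySem.List.index?_append_of_mem _ hvp
  · have hvx : v ≠ x := h.resolve_left hvp
    rw [(PySem.List.index?_eq_none_iff _ _).2 hvp,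
      (PySem.List.index?_eq_none_iff _ _).2 (by
        intro hm; rcases List.mem_append.1 hm with hm | hm
        · exact hvp hm
        · simp at hm; exact hvx hm)]

-- the dict built by B's first pass: value v ↦ (first index of v in l : Int), for in-range v
theorem pvBuild_get? (N : Int) (l : List Int) : ∀ (v : Int),
    (pvBuild N l).get? v =
      if 0 ≤ v ∧ v < N then (PySem.List.index? l v).map (fun k => (k : Int)) else none := by
  induction l using List.reverseRecOn with
  | nil =>
    intro v
    have h1 : pvBuild N [] = PySem.Dict.empty := rfl
    rw [h1]
    have h2 : PySem.List.index? ([] : List Int) v = none :=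
      (PySem.List.index?_eq_none_iff _ _).2 (by simp)
    rw [h2]
    split <;> rfl
  | append_singleton p x ih =>
    intro v
    have henum : PySem.List.enumerate (p ++ [x]) 0
        = PySem.List.enumerate p 0 ++ [((p.length : Int), x)] := by
      rw [PySem.List.enumerate_append]; simp [PySem.List.enumerate]
    have hstep : pvBuild N (p ++ [x]) =
        (if (-1 : Int) < x ∧ x < N ∧ ¬ (pvBuild N p).contains x = true
          then (pvBuild N p).insert x (p.length : Int) else pvBuild N p) := by
      unfold pvBuild
      rw [henum, List.foldl_append]
      rfl
    by_cases hxr : (-1 : Int) < x ∧ x < N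
    · have hxvalid : 0 ≤ x ∧ x < N := ⟨by omega, hxr.2⟩
      have hcon : (pvBuild N p).contains x = true ↔ x ∈ p := by
        rw [PySem.Dict.contains_eq_isSome_get?, ih x, if_pos hxvalid]
        cases hpx : PySem.List.index? p x with
        | none => simp [(PySem.List.index?_eq_none_iff _ _).1 hpx]
        | some k =>
          have hxp : x ∈ p := (PySem.List.index?_isSome_iff _ _).1 (by rw [hpx]; rfl)
          simp [hxp]
      by_cases hxc : x ∈ p
      · -- already present: no insert, index? unchanged
        rw [hstep, if_neg (by simp [hcon.2 hxc])]
        rw [ih v]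
        by_cases hv : 0 ≤ v ∧ v < N
        · rw [if_pos hv, if_pos hv, pvIndexSame p x v (by
              by_cases h : v = x
              · exact Or.inl (h ▸ hxc)
              · exact Or.inr h)]
        · rw [if_neg hv, if_neg hv]
      · -- new in-range value: inserted with index p.length
        have hcf : ¬ (pvBuild N p).contains x = true := fun h => hxc (hcon.1 h)
        rw [hstep, if_pos ⟨hxr.1, hxr.2, hcf⟩]
        by_cases hvx : v = x
        · subst hvx
          rw [PySem.Dict.get?_insert_self, if_pos hxvalid,
            PySem.List.index?_append_singleton_self p v hxc]
          rfl
        · rw [PySem.Dict.get?_insert_of_ne _ _ hvx, ih v]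
          by_cases hv : 0 ≤ v ∧ v < N
          · rw [if_pos hv, if_pos hv, pvIndexSame p x v (Or.inr hvx)]
          · rw [if_neg hv, if_neg hv]
    · -- out-of-range value: not inserted
      rw [hstep, if_neg (by intro h; exact hxr ⟨h.1, h.2.1⟩)]
      rw [ih v]
      by_cases hv : 0 ≤ v ∧ v < N
      · have hvx : v ≠ x := by rintro rfl; exact hxr ⟨by omega, hv.2⟩
        rw [if_pos hv, if_pos hv, pvIndexSame p x v (Or.inr hvx)]
      · rw [if_neg hv, if_neg hv]

-- descending scan: if every value in vs misses the dict, the default -1 survives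
theorem pvScan_none (d : PySem.Dict Int Int) (vs : List Int)
    (h : ∀ v ∈ vs, d.get? v = none) : pvScan d vs = -1 := by
  induction vs with
  | nil => rfl
  | cons v rest ih =>
    simp only [pvScan, h v (List.mem_cons_self)]
    exact ih (fun w hw => h w (List.mem_cons_of_mem _ hw))

-- descending scan down from a: the first hit is the largest value present
theorem pvScan_down (d : PySem.Dict Int Int) (m k a : Int)
    (hm0 : 0 ≤ m) (hma : m ≤ a)
    (hget : d.get? m = some k)
    (hhi : ∀ v, m < v → d.get? v = none) :
    pvScan d (PySem.List.pyRange a (-1) (-1)) = k := by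
  have ht : ∃ t : Nat, a = m + t := ⟨(a - m).toNat, by omega⟩
  rcases ht with ⟨t, rfl⟩
  clear hma
  induction t with
  | zero =>
    rw [PySem.List.pyRange_neg_one_cons (by omega)]
    simp only [pvScan]
    rw [show m + (0 : Nat) = m by omega, hget]
  | succ s ih =>
    rw [PySem.List.pyRange_neg_one_cons (by push_cast; omega)]
    simp only [pvScan]
    rw [hhi (m + (s + 1 : Nat)) (by push_cast; omega)]
    rw [show m + ((s + 1 : Nat) : Int) - 1 = m + (s : Nat) by push_cast; ring]
    exact ih

-- ===== VERDICT (by name: the statement is the Claim_ definition above) =====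
theorem max_test_complete_spec : Claim_equal_max_test_complete := by
  intro A _ hpre
  unfold Spec_max_test_complete max_test_complete max_test_complete_alt
  have hlen : (0 : Int) < (A.length : Int) := by
    have := List.length_pos_iff.2 hpre; exact_mod_cast this
  have hfold :
      (fun (p : Int × Int) (iv : Int × Int) =>
        if p.1 < iv.2 ∧ iv.2 < (A.length : Int) then (iv.2, iv.1) else p)
      = pvStep (A.length : Int) := rfl
  rw [hfold]
  simp only []
  rcases pvInv (A.length : Int) A with ⟨hf, hst⟩ | ⟨m, k, hst, hm0, hmN, hmem, hmax, hidx⟩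
  · -- no in-range value: dict empty on every key, scan returns -1, both sides agree
    rw [hst]
    have hscan : pvScan (pvBuild (A.length : Int) A)
        (PySem.List.pyRange ((A.length : Int) - 1) (-1) (-1)) = -1 := by
      apply pvScan_none
      intro v _
      rw [pvBuild_get? (A.length : Int) A v]
      by_cases hv : 0 ≤ v ∧ v < (A.length : Int)
      · rw [if_pos hv, (PySem.List.index?_eq_none_iff _ _).2 (fun hvA => hf v hvA hv)]
        rfl
      · rw [if_neg hv]
    rw [hscan]
  · -- in-range maximum m with first index k
    rw [hst]
    have hscan : pvScan (pvBuild (A.length : Int) A)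
        (PySem.List.pyRange ((A.length : Int) - 1) (-1) (-1)) = (k : Int) := by
      apply pvScan_down _ m (k : Int) _ hm0 (by omega)
      · rw [pvBuild_get? (A.length : Int) A m, if_pos ⟨hm0, hmN⟩, hidx]; rfl
      · intro v hv
        rw [pvBuild_get? (A.length : Int) A v]
        by_cases hvr : 0 ≤ v ∧ v < (A.length : Int)
        · rw [if_pos hvr, (PySem.List.index?_eq_none_iff _ _).2 (by
            intro hvA
            have := hmax v hvA hvr.1 hvr.2
            omega)]
          rfl
        · rw [if_neg hvr]
    rw [hscan]
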